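-- pv_equiv track=rewrite | github.com/JerBast/advent-of-code | 2024/day09.py | checksum
-- ===== SOURCE A (Python) =====
-- def checksum(disk: list[tuple[int, int]]) -> int:
--     c = 0
--     i = 0
--     for cnt, val in disk:
--         if val != -1:
--             c += val * (cnt * i + (cnt * (cnt - 1) // 2))
--         i += cnt
--     return c
-- ===== SOURCE B (Python) =====
-- def checksum(disk: list[tuple[int, int]]) -> int:
--     # Right-to-left pass with a shift invariant: no running position index.
--     # C = checksum of the suffix processed so far, as if it started at position 0;
--     # W = sum of val*cnt over its file runs. Prepending a run of length cnt shifts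
--     # the whole suffix right by cnt, which adds cnt*W to C.
--     W = 0
--     C = 0
--     for cnt, val in reversed(disk):
--         C += cnt * W
--         if val != -1:
--             W += val * cnt
--             C += val * (cnt * (cnt - 1) // 2)
--     return C
-- ===== Notes on version B (the rewrite author's own statement) =====
-- stated objective: alternative
-- what changed: B traverses the runs right-to-left with a shift invariant (suffix checksum C relative to position 0 plus suffix file weight W, shifting by cnt*W per run), eliminating A's running position index and its cnt*i term.
import Mathlib
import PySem

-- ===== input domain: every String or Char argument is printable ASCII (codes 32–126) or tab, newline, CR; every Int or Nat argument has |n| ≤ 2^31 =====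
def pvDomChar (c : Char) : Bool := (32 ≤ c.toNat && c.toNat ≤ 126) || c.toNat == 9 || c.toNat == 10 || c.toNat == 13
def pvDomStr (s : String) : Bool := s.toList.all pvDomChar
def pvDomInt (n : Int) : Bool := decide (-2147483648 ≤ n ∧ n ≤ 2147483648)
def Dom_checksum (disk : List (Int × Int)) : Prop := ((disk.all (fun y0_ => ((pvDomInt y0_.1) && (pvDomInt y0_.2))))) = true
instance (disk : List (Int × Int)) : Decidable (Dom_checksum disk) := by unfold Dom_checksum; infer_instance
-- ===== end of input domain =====

-- B traverses the runs right-to-left with a shift invariant (suffix checksum relative to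
-- position 0 plus suffix file weight), eliminating A's running position index; alternative, not faster.

-- ===== PORT A =====
def checksum (disk : List (Int × Int)) : Int :=
  (disk.foldl (fun (s : Int × Int) p =>
     (if p.2 ≠ -1 then s.1 + p.2 * (p.1 * s.2 + PySem.Int.floordiv (p.1 * (p.1 - 1)) 2) else s.1,
      s.2 + p.1)) (0, 0)).1

-- ===== PORT B =====
-- state s = (W, C); loop body of Source B: C += cnt*W; if val != -1: W += val*cnt; C += val*(cnt*(cnt-1)//2)
def pvStepB (s : Int × Int) (p : Int × Int) : Int × Int :=
  let C := s.2 + p.1 * s.1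
  if p.2 ≠ -1 then (s.1 + p.2 * p.1, C + p.2 * (PySem.Int.floordiv (p.1 * (p.1 - 1)) 2))
  else (s.1, C)

def checksum_alt (disk : List (Int × Int)) : Int :=
  (disk.reverse.foldl pvStepB (0, 0)).2

-- ===== PRECONDITION & SPEC =====
def Spec_checksum (disk : List (Int × Int)) (out : Int) : Prop := out = checksum_alt disk
instance (disk : List (Int × Int)) (out : Int) : Decidable (Spec_checksum disk out) := by unfold Spec_checksum; infer_instance

-- ===== CLAIM (what is proved, stated in full; the proofs are below) =====
def Claim_equal_checksum : Prop := ∀ (disk : List (Int × Int)), Dom_checksum disk → Spec_checksum disk (checksum disk)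

-- ===== LEMMAS AND PROOFS =====

-- ===== VERDICT (by name: the statement is the Claim_ definition above) =====
/-- Loop invariant: A's fold from state (c, i) returns c plus i times the suffix weight
plus the suffix checksum, where (W, C) is B's right-to-left combination over the suffix. -/
lemma pvInv (disk : List (Int × Int)) : ∀ (c i : Int),
    (disk.foldl (fun (s : Int × Int) p =>
       (if p.2 ≠ -1 then s.1 + p.2 * (p.1 * s.2 + PySem.Int.floordiv (p.1 * (p.1 - 1)) 2) else s.1,
        s.2 + p.1)) (c, i)).1
      = c + i * (disk.foldr (fun p s => pvStepB s p) (0, 0)).1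
          + (disk.foldr (fun p s => pvStepB s p) (0, 0)).2 := by
  induction disk with
  | nil => intro c i; simp
  | cons p rest ih =>
      intro c i
      simp only [List.foldl_cons, List.foldr_cons]
      rw [ih]
      set t := rest.foldr (fun p s => pvStepB s p) (0, 0) with ht
      simp only [pvStepB]
      split_ifs with hv <;> simp <;> ring

-- ===== VERDICT (by name: the statement is the Claim_ definition above) =====
theorem checksum_spec : Claim_equal_checksum := by
  intro disk _
  unfold Spec_checksum checksum checksum_alt
  rw [List.foldl_reverse, pvInv disk 0 0]
  simp
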